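-- pv_equiv track=rewrite | github.com/baeshiii/ewan-ko-kung-ano-to | test.py | multiply_row
-- ===== SOURCE A (Python) =====
-- def multiply_row(args):
--     A, B, row_index = args
--     cols_B = len(B[0])
--     cols_A = len(A[0])
--
--     result_row = [0] * cols_B
--
--     for j in range(cols_B):
--         for k in range(cols_A):
--             result_row[j] += A[row_index][k] * B[k][j]
--
--     return row_index, result_row
-- ===== SOURCE B (Python) =====
-- def multiply_row(args):
--     A, B, row_index = args
--     cols_B = len(B[0])
--     cols_A = len(A[0])
--     if cols_B == 0:
--         return row_index, []
--     result_row = [0] * cols_B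
--     for k in range(cols_A):
--         a = A[row_index][k]
--         result_row = [r + a * b for r, b in zip(result_row, B[k])]
--     return row_index, result_row
-- ===== Notes on version B (the rewrite author's own statement) =====
-- stated objective: alternative
-- what changed: B builds the result row as a running linear combination of B's rows (saxpy sweep: for each k it rebuilds the whole row by adding A[row_index][k] * B[k] elementwise via zip), instead of A's per-entry dot products computed by a nested j/k loop with in-place index updates; an empty result row returns immediately with nothing to accumulate.
import Mathlib
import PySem

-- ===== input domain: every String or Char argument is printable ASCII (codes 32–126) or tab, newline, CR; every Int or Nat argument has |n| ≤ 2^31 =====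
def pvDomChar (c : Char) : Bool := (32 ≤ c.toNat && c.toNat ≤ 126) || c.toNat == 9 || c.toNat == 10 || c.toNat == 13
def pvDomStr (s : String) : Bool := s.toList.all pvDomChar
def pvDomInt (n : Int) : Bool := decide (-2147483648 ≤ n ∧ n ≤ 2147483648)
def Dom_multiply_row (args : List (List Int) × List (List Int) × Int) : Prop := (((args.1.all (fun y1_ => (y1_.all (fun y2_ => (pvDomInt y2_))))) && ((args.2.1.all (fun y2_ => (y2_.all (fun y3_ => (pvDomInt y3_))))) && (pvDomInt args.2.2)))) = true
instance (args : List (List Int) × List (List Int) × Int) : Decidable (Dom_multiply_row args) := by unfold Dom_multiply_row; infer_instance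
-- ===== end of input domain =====

-- B builds the result row as a running linear combination of B's rows (saxpy sweep over k)
-- instead of A's per-entry dot products with nested index loops; same cost, different traversal.

-- ===== PORT A =====
def multiply_row (args : List (List Int) × List (List Int) × Int) : Int × List Int :=
  let A := args.1
  let B := args.2.1
  let row_index := args.2.2
  let cols_B := (PySem.List.pyGetD B 0 []).length
  let cols_A := (PySem.List.pyGetD A 0 []).length
  let result_row :=
    (PySem.List.pyRange 0 cols_B 1).foldl
      (fun res j =>
        (PySem.List.pyRange 0 cols_A 1).foldl
          (fun res k =>
            PySem.List.pySetD res j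
              (PySem.List.pyGetD res j 0 +
                PySem.List.pyGetD (PySem.List.pyGetD A row_index []) k 0 *
                  PySem.List.pyGetD (PySem.List.pyGetD B k []) j 0))
          res)
      (List.replicate cols_B 0)
  (row_index, result_row)

-- ===== PORT B =====
def multiply_row_alt (args : List (List Int) × List (List Int) × Int) : Int × List Int :=
  match args with
  | (A, B, row_index) =>
    if ((PySem.List.pyGetD B 0 []).length == 0) then (row_index, [])
    else
      (row_index,
        (PySem.List.pyRange 0 (PySem.List.pyGetD A 0 []).length 1).foldl
          (fun result_row k =>
            let a := PySem.List.pyGetD (PySem.List.pyGetD A row_index []) k 0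
            List.zipWith (fun r b => r + a * b) result_row (PySem.List.pyGetD B k []))
          (List.replicate (PySem.List.pyGetD B 0 []).length 0))

-- ===== PRECONDITION & SPEC =====
-- Pre_ excludes exactly the inputs on which the Python A raises an IndexError: empty A or B
-- (len(A[0])/len(B[0]) fails), and — only when both the result row and the dot products are
-- nonempty, so the loop body actually runs — an out-of-range row_index, a row A[row_index]
-- shorter than cols_A, fewer than cols_A rows in B, or a row among B's first cols_A rows
-- shorter than cols_B.  On every input A returns on, Pre_ holds.
def Pre_multiply_row (args : List (List Int) × List (List Int) × Int) : Prop :=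
  let A := args.1
  let B := args.2.1
  let row_index := args.2.2
  let cols_A := A.headI.length
  let cols_B := B.headI.length
  A ≠ [] ∧ B ≠ [] ∧
    (0 < cols_B → 0 < cols_A →
      (PySem.Raise.InRange A.length row_index ∧
       cols_A ≤ (PySem.List.pyGetD A row_index []).length ∧
       cols_A ≤ B.length ∧
       ∀ bk ∈ B.take cols_A, cols_B ≤ bk.length))
instance (args : List (List Int) × List (List Int) × Int) : Decidable (Pre_multiply_row args) := by
  unfold Pre_multiply_row; infer_instance

def pvWitness_multiply_row : (List (List Int) × List (List Int) × Int) :=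
  ([[1, 2]], [[3, 4], [5, 6]], 0)

def Spec_multiply_row (args : List (List Int) × List (List Int) × Int) (out : Int × List Int) : Prop := out = multiply_row_alt args
instance (args : List (List Int) × List (List Int) × Int) (out : Int × List Int) : Decidable (Spec_multiply_row args out) := by unfold Spec_multiply_row; infer_instance

-- ===== CLAIM (what is proved, stated in full; the proofs are below) =====
def Claim_equal_multiply_row : Prop := ∀ (args : List (List Int) × List (List Int) × Int), Dom_multiply_row args → Pre_multiply_row args → Spec_multiply_row args (multiply_row args)

-- ===== LEMMAS AND PROOFS =====

-- A's inner k-loop only touches index j: it collapses to one update of index j by the dot-product sum.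
lemma inner_loop_eval (t : Nat → Int) :
    ∀ (n : Nat) (res : List Int) (j : Nat), j < res.length →
      (List.range n).foldl
          (fun r k => PySem.List.pySetD r (j : Int) (PySem.List.pyGetD r (j : Int) 0 + t k)) res
        = res.set j (res.getD j 0 + ((List.range n).map t).sum) := by
  intro n
  induction n with
  | zero =>
    intro res j hj
    simp only [List.range_zero, List.foldl_nil, List.map_nil, List.sum_nil, add_zero]
    rw [List.getD_eq_getElem res 0 hj, List.set_getElem_self]
  | succ n ih =>
    intro res j hj
    rw [List.range_succ, List.foldl_append, ih res j hj, List.foldl_cons, List.foldl_nil,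
      PySem.List.pySetD_natCast, PySem.List.pyGetD_natCast, List.set_set]
    have hlen : j < (res.set j (res.getD j 0 + ((List.range n).map t).sum)).length := by
      simpa using hj
    rw [List.getD_eq_getElem _ _ hlen, List.getElem_set_self]
    rw [List.getD_eq_getElem res 0 hj]
    simp [add_assoc]

-- A's outer j-loop fills the row left to right with the dot products over k.
lemma A_loop_eval (nA : Nat) (f : Nat → Nat → Int) :
    ∀ (n m : Nat), n ≤ m →
      (List.range n).foldl
          (fun (r : List Int) (j : Nat) =>
            (List.range nA).foldl
              (fun (r : List Int) (k : Nat) => PySem.List.pySetD r (j : Int) (PySem.List.pyGetD r (j : Int) 0 + f k j)) r)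
          (List.replicate m 0)
        = ((List.range n).map (fun j => ((List.range nA).map (fun k => f k j)).sum))
            ++ List.replicate (m - n) (0 : Int) := by
  intro n
  induction n with
  | zero => intro m _; simp
  | succ n ih =>
    intro m h
    rw [List.range_succ, List.foldl_append, ih m (by omega), List.foldl_cons, List.foldl_nil]
    set u := (List.range n).map (fun j => ((List.range nA).map (fun k => f k j)).sum) with hu
    have hulen : u.length = n := by simp [hu]
    have hlen : n < (u ++ List.replicate (m - n) (0 : Int)).length := by
      simp [hulen]; omega
    rw [inner_loop_eval _ nA _ n hlen]
    have hgd : (u ++ List.replicate (m - n) (0 : Int)).getD n 0 = 0 := by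
      rw [List.getD_eq_getElem _ _ hlen, List.getElem_append_right (by omega)]
      simp [hulen]
    rw [hgd, zero_add]
    have hset : (u ++ List.replicate (m - n) (0 : Int)).set n (((List.range nA).map (fun k => f k n)).sum)
        = u ++ (List.replicate (m - n) (0 : Int)).set 0 (((List.range nA).map (fun k => f k n)).sum) := by
      rw [List.set_append]
      simp [hulen]
    rw [hset]
    have hmn : m - n = (m - (n + 1)) + 1 := by omega
    rw [hmn, List.replicate_succ, List.set_cons_zero]
    rw [List.map_append]
    simp [hu]

-- B's k-loop keeps the row equal to the partial linear combination of B's first rows.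
lemma zipWith_map_range (m : Nat) (u : Nat → Int) (c : Int) (l : List Int) (h : m ≤ l.length) :
    List.zipWith (fun x b => x + c * b) ((List.range m).map u) l
      = (List.range m).map (fun j => u j + c * l.getD j 0) := by
  apply List.ext_getElem
  · simpa using h
  · intro i h1 h2
    have hi : i < m := by simpa using h2
    have hil : i < l.length := by omega
    rw [List.getElem_zipWith]
    simp [List.getElem?_eq_getElem hil]

lemma B_loop_eval (m : Nat) (g : Nat → Int) (Bk : Nat → List Int) :
    ∀ (n : Nat), (∀ k, k < n → m ≤ (Bk k).length) →
      (List.range n).foldl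
          (fun r k => List.zipWith (fun x b => x + g k * b) r (Bk k)) (List.replicate m 0)
        = (List.range m).map (fun j => ((List.range n).map (fun k => g k * (Bk k).getD j 0)).sum) := by
  intro n
  induction n with
  | zero => simp [List.map_const']
  | succ n ih =>
    intro h
    rw [List.range_succ, List.foldl_append, ih (fun k hk => h k (by omega)),
      List.foldl_cons, List.foldl_nil]
    rw [zipWith_map_range m _ _ _ (h n (by omega))]
    apply List.map_congr_left
    intro j hj
    simp

-- ===== VERDICT (by name: the statement is the Claim_ definition above) =====
theorem multiply_row_spec : Claim_equal_multiply_row := by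
  intro args hdom hpre
  obtain ⟨A, B, ri⟩ := args
  obtain ⟨hA, hB, hguard⟩ := hpre
  obtain ⟨a0, A', rfl⟩ := List.exists_cons_of_ne_nil hA
  obtain ⟨b0, B', rfl⟩ := List.exists_cons_of_ne_nil hB
  simp only [List.headI] at hguard
  by_cases hz : b0.length = 0
  · -- empty result row: A's outer loop is empty, B returns immediately
    simp [Spec_multiply_row, multiply_row, multiply_row_alt, hz]
  · have hpos : 0 < b0.length := Nat.pos_of_ne_zero hz
    have hBk : ∀ k, k < a0.length → b0.length ≤ (PySem.List.pyGetD (b0 :: B') (k : Int) []).length := by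
      intro k hk
      obtain ⟨_, _, hAB, hall⟩ := hguard hpos (by omega)
      have hklen : k < (b0 :: B').length := lt_of_lt_of_le hk hAB
      rw [PySem.List.pyGetD_natCast, List.getD_eq_getElem _ _ hklen]
      have hklen' : k < B'.length + 1 := by simpa using hklen
      have h1 : k < ((b0 :: B').take a0.length).length := by
        simp
        omega
      have h2 := List.getElem_mem h1
      rw [List.getElem_take] at h2
      exact hall _ h2
    simp only [Spec_multiply_row, multiply_row, multiply_row_alt, Prod.mk.injEq,
      PySem.List.pyGetD_zero_cons, beq_iff_eq, hz, if_false, true_and]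
    rw [PySem.List.pyRange_zero_nat, PySem.List.pyRange_zero_nat, List.foldl_map, List.foldl_map]
    simp only [List.foldl_map]
    rw [A_loop_eval a0.length
        (fun k j => PySem.List.pyGetD (PySem.List.pyGetD (a0 :: A') ri []) (k : Int) 0 *
          PySem.List.pyGetD (PySem.List.pyGetD (b0 :: B') (k : Int) []) (j : Int) 0)
        b0.length b0.length le_rfl,
      B_loop_eval b0.length
        (fun k => PySem.List.pyGetD (PySem.List.pyGetD (a0 :: A') ri []) (k : Int) 0)
        (fun k => PySem.List.pyGetD (b0 :: B') (k : Int) []) a0.length hBk]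
    simp [PySem.List.pyGetD_natCast]
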